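-- pv_equiv track=rewrite | github.com/orangehn/atg | atg-coding/gen_atg/utils/adjust_reference_record.py | get_type_default_type
-- ===== SOURCE A (Python) =====
-- base_type = {
--     'string', 'int', 'dag', 'bit',  # startswith 'bits', 'list'
-- }
--
-- common_type = {
--     'Instruction', 'Predicate', 'PatFrag', 'RegisterClass', 'ValueType', 'ImmLeaf', 'SDNode', 'ComplexPattern',
--     'Register', 'RegisterOperand', 'SDPatternOperator', 'Operand', 'PatLeaf', 'DAGOperand', 'ComplexPattern',
--     'InstrItinClass', "SubtargetFeature", "InstrMapping", "Requires",
-- }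
--
-- type_default_type_dict = {
--     'FIELD_CMP_FORMAT': 'Type_AUX_FM',
--     'FIELD_CMP_COND': 'Type_AUX_FM',
--     'FIELD_FMT': 'Type_AUX_FM',
--     'OPGROUP': 'Type_AUX_FM',
--     'OPCODE2': 'Type_AUX_FM',
--     'OPCODE3': 'Type_AUX_FM',
--     'OPCODE5': 'Type_AUX_FM',
--     'OPCODE6': 'Type_AUX_FM',
--     'Format': 'InstFormat',
--     'SplatComplexPattern': 'ComplexPattern',
-- }
--
-- def get_type_default_type(type_str):
--     if type_str in type_default_type_dict:
--         return type_default_type_dict[type_str]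
--     if type_str in ['let']:
--         return None
--     if type_str in base_type or type_str in common_type or \
--             type_str.startswith('bit'):  # base/common type 不替换
--         return None
--     if type_str.startswith('list<') and type_str.endswith(">"):
--         inner_type = type_str[5:-1]
--         inner_type = get_type_default_type(inner_type)
--         if inner_type is None:
--             return None
--         else:
--             return f"list<{inner_type}>"
--     else:
--         raise ValueError(type_str)
-- ===== SOURCE B (Python) =====
-- base_type = {
--     'string', 'int', 'dag', 'bit',
-- }
--
-- common_type = {
--     'Instruction', 'Predicate', 'PatFrag', 'RegisterClass', 'ValueType', 'ImmLeaf', 'SDNode', 'ComplexPattern',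
--     'Register', 'RegisterOperand', 'SDPatternOperator', 'Operand', 'PatLeaf', 'DAGOperand', 'ComplexPattern',
--     'InstrItinClass', "SubtargetFeature", "InstrMapping", "Requires",
-- }
--
-- type_default_type_dict = {
--     'FIELD_CMP_FORMAT': 'Type_AUX_FM',
--     'FIELD_CMP_COND': 'Type_AUX_FM',
--     'FIELD_FMT': 'Type_AUX_FM',
--     'OPGROUP': 'Type_AUX_FM',
--     'OPCODE2': 'Type_AUX_FM',
--     'OPCODE3': 'Type_AUX_FM',
--     'OPCODE5': 'Type_AUX_FM',
--     'OPCODE6': 'Type_AUX_FM',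
--     'Format': 'InstFormat',
--     'SplatComplexPattern': 'ComplexPattern',
-- }
--
--
-- def get_type_default_type(type_str):
--     # count the nesting depth by repeated-prefix matching (no per-layer restringing),
--     # check all closing brackets at once, classify the innermost core once, and
--     # rebuild the answer with string multiplication instead of a recursion.
--     depth = 0
--     while type_str.startswith('list<' * (depth + 1)):
--         depth += 1
--     if not type_str.endswith('>' * depth):
--         raise ValueError(type_str)
--     core = type_str[5 * depth: len(type_str) - depth]
--     if core in type_default_type_dict:
--         return 'list<' * depth + type_default_type_dict[core] + '>' * depth
--     if core == 'let' or core in base_type or core in common_type or core.startswith('bit'):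
--         return None
--     raise ValueError(type_str)
-- ===== Notes on version B (the rewrite author's own statement) =====
-- stated objective: alternative
-- what changed: Replaces A's per-layer recursion (strip one list<...> layer, recurse, restring on the way back up) and its three separate lookup tables by repeated-prefix depth counting ('list<'*(depth+1)), a single endswith check of all closing brackets at once, one merged Optional-valued replacement table consulted once on the innermost core, and a closed-form rebuild with string multiplication; Pre_ excludes only the inputs on which A raises ValueError (strings that are not list<...> wrappers around a known core), where B raises ValueError too.
import Mathlib
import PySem

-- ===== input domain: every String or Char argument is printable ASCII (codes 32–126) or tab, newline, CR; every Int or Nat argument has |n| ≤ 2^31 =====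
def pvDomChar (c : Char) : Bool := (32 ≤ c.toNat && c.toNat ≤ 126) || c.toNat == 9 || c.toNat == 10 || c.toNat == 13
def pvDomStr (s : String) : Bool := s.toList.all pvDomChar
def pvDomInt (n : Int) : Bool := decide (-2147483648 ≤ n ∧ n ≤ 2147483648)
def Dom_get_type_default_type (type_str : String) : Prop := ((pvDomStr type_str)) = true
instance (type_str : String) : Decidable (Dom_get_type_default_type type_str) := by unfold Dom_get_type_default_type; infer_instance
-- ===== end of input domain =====

-- B replaces A's per-layer recursion (strip one list<...> layer, recurse, restring on the way up) by
-- repeated-prefix depth counting, one merged Optional-valued lookup table, and a closed-form rebuild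
-- (objective: alternative decomposition).

-- ===== PORT A =====
-- module constants of Source A (Python dict / sets over strings, as List Char data)
def pvDict : List (List Char × List Char) :=
  [("FIELD_CMP_FORMAT".toList, "Type_AUX_FM".toList),
   ("FIELD_CMP_COND".toList, "Type_AUX_FM".toList),
   ("FIELD_FMT".toList, "Type_AUX_FM".toList),
   ("OPGROUP".toList, "Type_AUX_FM".toList),
   ("OPCODE2".toList, "Type_AUX_FM".toList),
   ("OPCODE3".toList, "Type_AUX_FM".toList),
   ("OPCODE5".toList, "Type_AUX_FM".toList),
   ("OPCODE6".toList, "Type_AUX_FM".toList),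
   ("Format".toList, "InstFormat".toList),
   ("SplatComplexPattern".toList, "ComplexPattern".toList)]

def pvBase : List (List Char) := ["string".toList, "int".toList, "dag".toList, "bit".toList]

def pvCommon : List (List Char) :=
  ["Instruction".toList, "Predicate".toList, "PatFrag".toList, "RegisterClass".toList,
   "ValueType".toList, "ImmLeaf".toList, "SDNode".toList, "ComplexPattern".toList,
   "Register".toList, "RegisterOperand".toList, "SDPatternOperator".toList, "Operand".toList,
   "PatLeaf".toList, "DAGOperand".toList, "InstrItinClass".toList, "SubtargetFeature".toList,
   "InstrMapping".toList, "Requires".toList]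

-- a list<...> layer can be stripped only on strings of length ≥ 6, so s[5:-1] shrinks (termination of A's recursion)
lemma pvStripShrink {s : List Char}
    (h : (PySem.Chars.startswith s "list<".toList && PySem.Chars.endswith s ">".toList) = true) :
    (PySem.List.slice s (some 5) (some (-1))).length < s.length := by
  rw [Bool.and_eq_true] at h
  have hp := (PySem.Chars.startswith_iff s _).mp h.1
  have he := (PySem.Chars.endswith_iff s _).mp h.2
  obtain ⟨r, rfl⟩ := hp
  have hr : r ≠ [] := by
    rintro rfl
    exact absurd he (by decide)
  have h6 : 6 ≤ ("list<".toList ++ r).length := by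
    have : 1 ≤ r.length := List.length_pos_iff.mpr hr
    simp; omega
  rw [PySem.List.length_slice, PySem.List.clampIdx_neg_one]
  have h2 : PySem.List.clampIdx ("list<".toList ++ r).length 5
      = min 5 ("list<".toList ++ r).length := by
    exact_mod_cast PySem.List.clampIdx_natCast ("list<".toList ++ r).length 5
  rw [h2]; omega

-- literal transliteration of A's recursion
def goA (s : List Char) : Option (List Char) :=
  match List.lookup s pvDict with
  | some v => some v
  | none =>
    if s = "let".toList then none
    else if s ∈ pvBase ∨ s ∈ pvCommon ∨ PySem.Chars.startswith s "bit".toList then none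
    else if h : (PySem.Chars.startswith s "list<".toList && PySem.Chars.endswith s ">".toList) = true then
      match goA (PySem.List.slice s (some 5) (some (-1))) with
      | none => none
      | some inner => some ("list<".toList ++ inner ++ ">".toList)
    else none  -- raise ValueError(type_str): excluded by Pre_
termination_by s.length
decreasing_by exact pvStripShrink h

def get_type_default_type (type_str : String) : Option String :=
  (goA type_str.toList).map String.ofList

-- ===== PORT B =====
-- Source B's merged table: every known core mapped to its replacement (None ↦ none)
def pvKnown : List (List Char × Option (List Char)) :=
  [("FIELD_CMP_FORMAT".toList, some "Type_AUX_FM".toList),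
   ("FIELD_CMP_COND".toList, some "Type_AUX_FM".toList),
   ("FIELD_FMT".toList, some "Type_AUX_FM".toList),
   ("OPGROUP".toList, some "Type_AUX_FM".toList),
   ("OPCODE2".toList, some "Type_AUX_FM".toList),
   ("OPCODE3".toList, some "Type_AUX_FM".toList),
   ("OPCODE5".toList, some "Type_AUX_FM".toList),
   ("OPCODE6".toList, some "Type_AUX_FM".toList),
   ("Format".toList, some "InstFormat".toList),
   ("SplatComplexPattern".toList, some "ComplexPattern".toList),
   ("let".toList, none),
   ("string".toList, none), ("int".toList, none), ("dag".toList, none), ("bit".toList, none),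
   ("Instruction".toList, none), ("Predicate".toList, none), ("PatFrag".toList, none),
   ("RegisterClass".toList, none), ("ValueType".toList, none), ("ImmLeaf".toList, none),
   ("SDNode".toList, none), ("ComplexPattern".toList, none), ("Register".toList, none),
   ("RegisterOperand".toList, none), ("SDPatternOperator".toList, none), ("Operand".toList, none),
   ("PatLeaf".toList, none), ("DAGOperand".toList, none), ("InstrItinClass".toList, none),
   ("SubtargetFeature".toList, none), ("InstrMapping".toList, none), ("Requires".toList, none)]

-- u * k (Python string repetition)
def pvRepB (k : Nat) (u : List Char) : List Char := (List.replicate k u).flatten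

lemma pvRepB_length (k : Nat) (u : List Char) : (pvRepB k u).length = k * u.length := by
  simp [pvRepB]

-- while type_str.startswith('list<' * (depth + 1)): depth += 1
def depthB (s : List Char) (d : Nat) : Nat :=
  if h : PySem.Chars.startswith s (pvRepB (d + 1) "list<".toList) = true then
    depthB s (d + 1)
  else d
termination_by s.length + 1 - 5 * d
decreasing_by
  have hle := ((PySem.Chars.startswith_iff _ _).mp h).length_le
  rw [pvRepB_length] at hle
  have h5 : ("list<".toList).length = 5 := by decide
  rw [h5] at hle
  omega

def get_type_default_type_alt (type_str : String) : Option String :=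
  let s := type_str.toList
  let depth := depthB s 0
  if PySem.Chars.endswith s (List.replicate depth '>') then
    -- core = type_str[5*depth : len(type_str) - depth]  (both bounds are ≥ 0 Python ints)
    let core := PySem.List.slice s (some ((5 * depth : Nat) : Int)) (some ((s.length : Int) - (depth : Int)))
    let inner : Option (Option (List Char)) :=
      match List.lookup core pvKnown with
      | some v => some v
      | none =>
        if PySem.Chars.startswith core "bit".toList then some none
        else none  -- raise ValueError(type_str): excluded by Pre_
    match inner with
    | none => none  -- raise ValueError(type_str): excluded by Pre_
    | some none => none
    | some (some v) =>
        some (String.ofList (pvRepB depth "list<".toList ++ v ++ List.replicate depth '>'))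
  else none  -- raise ValueError(type_str): excluded by Pre_

-- ===== PRECONDITION & SPEC =====
-- Pre_ excludes exactly the inputs on which the Python A raises ValueError: strings that are not
-- finitely many list<...> wrappers around a string the function classifies (dict key, 'let',
-- base/common type, or a 'bit' prefix); B raises ValueError on the same inputs.
def pvClassifies (s : List Char) : Bool :=
  (List.lookup s pvDict).isSome || s == "let".toList || decide (s ∈ pvBase) ||
    decide (s ∈ pvCommon) || PySem.Chars.startswith s "bit".toList

-- the middle of l once k wrappers (5 chars left, 1 right each) are peeled off
def pvMid (l : List Char) (k : Nat) : List Char := (l.drop (5 * k)).take (l.length - 6 * k)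

def Pre_get_type_default_type (type_str : String) : Prop :=
  ∃ k ≤ type_str.toList.length,
    type_str.toList =
      (List.replicate k "list<".toList).flatten ++ pvMid type_str.toList k ++ List.replicate k '>' ∧
    pvClassifies (pvMid type_str.toList k) = true

instance (type_str : String) : Decidable (Pre_get_type_default_type type_str) := by
  unfold Pre_get_type_default_type; infer_instance

def pvWitness_get_type_default_type : String := "list<Format>"

def Spec_get_type_default_type (type_str : String) (out : Option String) : Prop :=
  out = get_type_default_type_alt type_str
instance (type_str : String) (out : Option String) : Decidable (Spec_get_type_default_type type_str out) := by
  unfold Spec_get_type_default_type; infer_instance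

-- ===== CLAIM (what is proved, stated in full; the proofs are below) =====
def Claim_equal_get_type_default_type : Prop := ∀ (type_str : String), Dom_get_type_default_type type_str → Pre_get_type_default_type type_str → Spec_get_type_default_type type_str (get_type_default_type type_str)

-- ===== LEMMAS AND PROOFS =====
-- abbreviation used only by the proofs: k wrappers around a core
def pvW (k : Nat) (c : List Char) : List Char :=
  pvRepB k "list<".toList ++ c ++ List.replicate k '>'

lemma pvRepB_add (m n : Nat) (u : List Char) :
    pvRepB (m + n) u = pvRepB m u ++ pvRepB n u := by
  unfold pvRepB
  rw [List.replicate_add, List.flatten_append]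

lemma pvRepB_succ (k : Nat) (u : List Char) :
    pvRepB (k + 1) u = u ++ pvRepB k u := by
  simp [pvRepB, List.replicate_succ]

lemma pvRepB_succ' (k : Nat) (u : List Char) :
    pvRepB (k + 1) u = pvRepB k u ++ u := by
  simp [pvRepB, List.replicate_succ']

-- a string that starts with 'list<' is classified by none of the early branches of either program
lemma pvNotClassified {s : List Char} (h : PySem.Chars.startswith s "list<".toList = true) :
    List.lookup s pvDict = none ∧ ¬ s = "let".toList ∧ s ∉ pvBase ∧ s ∉ pvCommon ∧
      PySem.Chars.startswith s "bit".toList = false := by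
  obtain ⟨r, rfl⟩ := (PySem.Chars.startswith_iff s _).mp h
  refine ⟨?_, ?_, ?_, ?_, ?_⟩
  · simp [pvDict, List.lookup]
  · simp
  · simp [pvBase]
  · simp [pvCommon]
  · rw [← Bool.not_eq_true, PySem.Chars.startswith_iff]
    simp [List.cons_prefix_cons]

-- a classified string never starts with 'list<'
lemma pvClassNoList {c : List Char} (hc : pvClassifies c = true) :
    ¬ "list<".toList <+: c := by
  intro hp
  obtain ⟨hd, hl, hb, hcm, hbit⟩ := pvNotClassified ((PySem.Chars.startswith_iff _ _).mpr hp)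
  rw [pvClassifies] at hc
  simp [hd, hb, hcm] at hc
  rcases hc with h | h
  · exact hl (by rw [h]; decide)
  · rw [show "bit".toList = ['b', 'i', 't'] from rfl] at hbit
    rw [h] at hbit
    exact absurd hbit (by decide)

-- 'list<' overruns a classified core into the closing brackets for no k
lemma pvNoOverrun {c : List Char} (hc : pvClassifies c = true) (k : Nat) :
    ¬ "list<".toList <+: c ++ List.replicate k '>' := by
  intro hp
  obtain ⟨t, ht⟩ := hp
  by_cases h5 : 5 ≤ c.length
  · apply pvClassNoList hc
    have h1 := congrArg (List.take 5) ht
    rw [List.take_append_of_le_length (l₂ := t) (by decide),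
        List.take_append_of_le_length h5] at h1
    have h2 : ("list<".toList).take 5 = "list<".toList := by decide
    rw [h2] at h1
    rw [h1]
    exact List.take_prefix 5 c
  · have hlen := congrArg List.length ht
    simp at hlen
    have hk1 : 1 ≤ k := by omega
    have hg := congrArg (fun l => l[c.length]?) ht
    simp only at hg
    rw [List.getElem?_append_left (by simp; omega),
        List.getElem?_append_right (Nat.le_refl c.length)] at hg
    have hrep : (List.replicate k '>')[c.length - c.length]? = some '>' := by
      simp [List.getElem?_replicate]
      omega
    rw [hrep] at hg
    have hm : '>' ∈ "list<".toList := List.mem_of_getElem? hg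
    exact absurd hm (by decide)

-- A's recursion on k wrappers around a classified core is the wrapped dict lookup
lemma pvGoA_W {c : List Char} (hc : pvClassifies c = true) (k : Nat) :
    goA (pvW k c) = Option.map (fun v => pvRepB k "list<".toList ++ v ++ List.replicate k '>')
      (List.lookup c pvDict) := by
  induction k with
  | zero =>
    rw [show pvW 0 c = c from by simp [pvW, pvRepB]]
    rw [goA]
    cases hd : List.lookup c pvDict with
    | some v => simp [pvRepB]
    | none =>
      simp only [Option.map_none]
      rw [pvClassifies, hd] at hc
      simp at hc
      by_cases h1 : c = "let".toList
      · simp [h1]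
      · rw [if_neg h1]
        have h2 : c ∈ pvBase ∨ c ∈ pvCommon ∨ PySem.Chars.startswith c "bit".toList = true := by
          tauto
      
        rw [if_pos h2]
  | succ k ih =>
    have hW : pvW (k + 1) c = "list<".toList ++ pvW k c ++ ['>'] := by
      rw [pvW, pvW, pvRepB_succ, List.replicate_succ']
      simp [List.append_assoc]
    set s := "list<".toList ++ pvW k c ++ ['>'] with hsdef
    rw [hW, goA]
    have hsw : PySem.Chars.startswith s "list<".toList = true := by
      rw [hsdef, PySem.Chars.startswith_iff]
      exact ⟨pvW k c ++ ['>'], by simp⟩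
    obtain ⟨hd, hl, hb, hcm, hbit⟩ := pvNotClassified hsw
    rw [hd]
    rw [if_neg hl, if_neg (by simp [hb, hcm]; exact hbit)]
    have hguard : (PySem.Chars.startswith s "list<".toList &&
        PySem.Chars.endswith s ">".toList) = true := by
      rw [Bool.and_eq_true]
      refine ⟨hsw, ?_⟩
      rw [hsdef, PySem.Chars.endswith_iff]
      exact ⟨"list<".toList ++ pvW k c, by simp⟩
    rw [dif_pos hguard]
    have hs : PySem.List.slice s (some 5) (some (-1)) = pvW k c := by
      rw [hsdef]
      simp [PySem.List.slice]
    rw [hs, ih]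
    cases List.lookup c pvDict with
    | none => simp
    | some v =>
      simp only [Option.map_some]
      rw [pvRepB_succ, List.replicate_succ']
      simp [List.append_assoc]

-- B's counting loop finds exactly the number of wrappers
lemma pvDepth_W {c : List Char} (hc : pvClassifies c = true) (k : Nat) :
    ∀ d, d ≤ k → depthB (pvW k c) d = k := by
  have main : ∀ n d, d ≤ k → k - d = n → depthB (pvW k c) d = k := by
    intro n
    induction n with
    | zero =>
      intro d hd hn
      have hdk : d = k := by omega
      subst hdk
      rw [depthB, dif_neg]
      intro hsw
      have hp := (PySem.Chars.startswith_iff _ _).mp hsw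
      rw [pvRepB_succ' d "list<".toList, pvW, List.append_assoc,
          List.prefix_append_right_inj] at hp
      exact pvNoOverrun hc d hp
    | succ n ih =>
      intro d hd hn
      rw [depthB, dif_pos ?hg]
      case hg =>
        rw [PySem.Chars.startswith_iff]
        have hsplit : pvRepB k "list<".toList =
            pvRepB (d + 1) "list<".toList ++ pvRepB (k - (d + 1)) "list<".toList := by
          rw [← pvRepB_add]
          congr 1
          omega
        rw [pvW, hsplit, List.append_assoc, List.append_assoc]
        exact List.prefix_append _ _
      exact ih (d + 1) (by omega) (by omega)
  intro d hd
  exact main (k - d) d hd rfl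

lemma pvLookupMapSome (c : List Char) (l : List (List Char × List Char)) :
    List.lookup c (l.map (fun p => (p.1, some p.2))) = (List.lookup c l).map some := by
  induction l with
  | nil => simp
  | cons p t ih =>
    simp only [List.map_cons, List.lookup]
    by_cases h : c == p.1 <;> simp [h, ih]

lemma pvLookupMapNone (c : List Char) (ks : List (List Char)) :
    List.lookup c (ks.map (fun k => (k, (none : Option (List Char))))) =
      if c ∈ ks then some none else none := by
  induction ks with
  | nil => simp
  | cons p t ih =>
    simp only [List.map_cons, List.lookup]
    by_cases h : c = p
    · simp [h]
    · rw [show (c == p) = false from beq_eq_false_iff_ne.mpr h]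
      simp [ih, h]

-- Source B's merged table against Source A's three tables
lemma pvKnown_lookup (c : List Char) :
    List.lookup c pvKnown =
      match List.lookup c pvDict with
      | some v => some (some v)
      | none =>
        if c = "let".toList ∨ c ∈ pvBase ∨ c ∈ pvCommon then some none else none := by
  have hk : pvKnown = pvDict.map (fun p => (p.1, some p.2)) ++
      (("let".toList :: (pvBase ++ pvCommon)).map (fun k => (k, (none : Option (List Char))))) := by
    rfl
  rw [hk, List.lookup_append, pvLookupMapSome, pvLookupMapNone]
  cases List.lookup c pvDict with
  | some v => simp
  | none => simp [List.mem_cons]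

-- ===== VERDICT (by name: the statement is the Claim_ definition above) =====
theorem get_type_default_type_spec : Claim_equal_get_type_default_type := by
  intro t _ hpre
  obtain ⟨k, hk, hshape, hcl⟩ := hpre
  set c := pvMid t.toList k with hcdef
  have hW : t.toList = pvW k c := hshape
  unfold Spec_get_type_default_type get_type_default_type get_type_default_type_alt
  rw [hW]
  simp only []
  rw [pvGoA_W hcl k, pvDepth_W hcl k 0 (Nat.zero_le k)]
  have hend : PySem.Chars.endswith (pvW k c) (List.replicate k '>') = true := by
    rw [PySem.Chars.endswith_iff]
    exact ⟨pvRepB k "list<".toList ++ c, by rw [pvW, List.append_assoc]⟩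
  rw [if_pos hend]
  have hlen5 : (pvRepB k "list<".toList).length = 5 * k := by
    rw [pvRepB_length, show ("list<".toList).length = 5 from by decide]
    omega
  have hlen : (pvW k c).length = 5 * k + c.length + k := by
    rw [pvW, List.length_append, List.length_append, hlen5, List.length_replicate]
  have hcast : ((pvW k c).length : Int) - (k : Int) = ((5 * k + c.length : Nat) : Int) := by
    rw [hlen]
    push_cast
    ring
  have hcore : PySem.List.slice (pvW k c) (some ((5 * k : Nat) : Int))
      (some (((pvW k c).length : Int) - (k : Int))) = c := by
    rw [hcast, PySem.List.slice_natCast, pvW, List.append_assoc,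
        show 5 * k = (pvRepB k "list<".toList).length from hlen5.symm, List.drop_left,
        Nat.add_sub_cancel_left]
    exact List.take_left
  rw [hcore, pvKnown_lookup c]
  cases hdd : List.lookup c pvDict with
  | some v => simp
  | none =>
    simp only []
    rw [pvClassifies, hdd] at hcl
    simp at hcl
    by_cases hmem : c = "let".toList ∨ c ∈ pvBase ∨ c ∈ pvCommon
    · rw [if_pos hmem]
      simp
    · rw [if_neg hmem]
      have hbit : PySem.Chars.startswith c "bit".toList = true := by
        rcases hcl with h | h
        · refine absurd ?_ hmem
          rcases h with (h1 | h1) | h1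
          · exact Or.inl (by rw [h1]; rfl)
          · exact Or.inr (Or.inl h1)
          · exact Or.inr (Or.inr h1)
        · exact h
      rw [hbit]
      simp
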